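-- pv_equiv track=rewrite | github.com/radoslawklos/Revision | main6.py | permu
-- ===== SOURCE A (Python) =====
-- def permu(word):
--     chars = list(word)
--     pers = []
--     for i in range(len(chars)):
--         for j in range(len(chars)):
--             if(i != j):
--                 for k in range(len(chars)):
--                     if(i != k and j != k):
--                         str_tmp = chars[i] + chars[j] + chars[k]
--                         if(str_tmp not in pers):
--                             pers.append(str_tmp)
--     return pers
-- ===== SOURCE B (Python) =====
-- def permu(word):
--     # Recursive selection: pick an index, recurse on the list with that index
--     # removed (no i!=j/i!=k/j!=k guards), then dedup once with a set.
--     def perms(cs, r):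
--         if r == 0:
--             return [[]]
--         out = []
--         for i in range(len(cs)):
--             rest = cs[:i] + cs[i + 1:]
--             for tail in perms(rest, r - 1):
--                 out.append([cs[i]] + tail)
--         return out
--
--     pers = []
--     seen = set()
--     for t in perms(list(word), 3):
--         s = ''.join(t)
--         if s not in seen:
--             seen.add(s)
--             pers.append(s)
--     return pers
-- ===== Notes on version B (the rewrite author's own statement) =====
-- stated objective: alternative
-- what changed: Replaces the three index loops with i!=j/i!=k/j!=k guards by a recursive pick-one-index-and-recurse-on-the-list-with-it-removed enumeration of ordered triples, and replaces the linear membership scan over the result list by a set membership test.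
import Mathlib
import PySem

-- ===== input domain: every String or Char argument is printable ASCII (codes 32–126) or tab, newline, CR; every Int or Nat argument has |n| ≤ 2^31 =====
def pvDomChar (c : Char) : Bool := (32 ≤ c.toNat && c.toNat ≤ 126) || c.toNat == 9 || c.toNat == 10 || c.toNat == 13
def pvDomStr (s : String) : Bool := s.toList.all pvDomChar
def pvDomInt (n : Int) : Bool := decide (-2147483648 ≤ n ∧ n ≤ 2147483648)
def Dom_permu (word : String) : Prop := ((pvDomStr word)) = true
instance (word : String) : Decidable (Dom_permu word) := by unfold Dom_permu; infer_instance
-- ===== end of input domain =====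

-- B replaces A's guarded triple index loop by a recursive remove-one-index enumeration of the
-- ordered triples and A's list-membership dedup by a set; return value proved equal on all inputs.

-- ===== PORT A =====
-- Indices i, j, k come from range(len(chars)), so they are always in range:
-- 'chars.getD i default' is exactly Python's chars[i] here.
-- 'chars[i] + chars[j] + chars[k]' on single characters is exactly 'String.ofList [ci, cj, ck]'.
def permu (word : String) : List String :=
  let chars := word.toList
  (List.range chars.length).foldl (fun pers i =>
    (List.range chars.length).foldl (fun pers j =>
      if i ≠ j then
        (List.range chars.length).foldl (fun pers k =>
          if i ≠ k ∧ j ≠ k then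
            let str_tmp := String.ofList [chars.getD i ' ', chars.getD j ' ', chars.getD k ' ']
            if str_tmp ∉ pers then pers ++ [str_tmp] else pers
          else pers) pers
      else pers) pers) []

-- ===== PORT B =====
-- Source B's perms: cs[:i] + cs[i+1:] is the PySem slices below; ''.join of a list of single
-- characters (tails are lists of chars) is exactly String.ofList.
def permuPerms (cs : List Char) (r : Nat) : List (List Char) :=
  match r with
  | 0 => [[]]
  | r + 1 =>
    (List.range cs.length).foldl (fun out (i : Nat) =>
      let rest := PySem.List.slice cs none (some (i : Int)) ++
                  PySem.List.slice cs (some ((i : Int) + 1)) none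
      out ++ (permuPerms rest r).map (fun tail => cs.getD i ' ' :: tail)) []

def permu_alt (word : String) : List String :=
  ((permuPerms word.toList 3).foldl
    (fun (acc : List String × PySem.Set String) t =>
      let s := String.ofList t
      if PySem.Set.contains acc.2 s then acc
      else (acc.1 ++ [s], PySem.Set.add acc.2 s))
    ([], PySem.Set.empty)).1

-- ===== PRECONDITION & SPEC =====
def Spec_permu (word : String) (out : List String) : Prop := out = permu_alt word
instance (word : String) (out : List String) : Decidable (Spec_permu word out) := by unfold Spec_permu; infer_instance

-- ===== CLAIM (what is proved, stated in full; the proofs are below) =====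
def Claim_equal_permu : Prop := ∀ (word : String), Dom_permu word → Spec_permu word (permu word)

-- ===== LEMMAS AND PROOFS =====

theorem pvFlatMapCongr {α β : Type} {l : List α} {f g : α → List β} (h : ∀ a ∈ l, f a = g a) :
    l.flatMap f = l.flatMap g := by
  simp only [List.flatMap_def]; rw [List.map_congr_left h]

theorem pvFoldlFoldl {α β γ : Type} (l : List α) (g : α → List β) (f : γ → β → γ) (init : γ) :
    l.foldl (fun acc x => (g x).foldl f acc) init = (l.flatMap g).foldl f init := by
  induction l generalizing init with
  | nil => rfl
  | cons x l ih => simp [List.foldl_append, ih]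

theorem pvSkip {α β : Type} (d : α) (xs : List α) (i : Nat) (hi : i < xs.length)
    (G : α → Nat → List β) :
    (List.range xs.length).flatMap
      (fun j => if j = i then [] else G (xs.getD j d) (if j < i then j else j - 1))
    = (List.range (xs.eraseIdx i).length).flatMap
      (fun j => G ((xs.eraseIdx i).getD j d) j) := by
  induction xs generalizing i G with
  | nil => simp at hi
  | cons x xs ih =>
    cases i with
    | zero =>
      simp only [List.eraseIdx_zero, List.tail_cons, List.length_cons,
        List.range_succ_eq_map, List.flatMap_cons, List.flatMap_map]
      simp
    | succ i' =>
      have hi' : i' < xs.length := by simpa using hi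
      simp only [List.eraseIdx_cons_succ, List.length_cons,
        List.range_succ_eq_map, List.flatMap_cons, List.flatMap_map]
      simp only [List.getD_cons_zero, List.getD_cons_succ]
      have h0 : (if (0:Nat) = i' + 1 then ([] : List β) else G x (if 0 < i' + 1 then 0 else 0 - 1)) = G x 0 := by
        simp
      rw [h0]
      congr 1
      have := ih i' hi' (fun c m => G c (m + 1))
      rw [← this]
      apply pvFlatMapCongr
      intro j _
      by_cases hj : j = i'
      · simp [hj]
      · have : ¬ (j + 1 = i' + 1) := by omega
        simp only [if_neg this, if_neg hj]
        congr 1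
        by_cases hlt : j < i'
        · simp [hlt]
        · have h1 : ¬ (j + 1 < i' + 1) := by omega
          simp only [if_neg hlt, if_neg h1]
          omega

theorem permuPerms_succ (cs : List Char) (r : Nat) :
    permuPerms cs (r + 1)
    = (List.range cs.length).flatMap
        (fun i => (permuPerms (cs.eraseIdx i) r).map (cs.getD i ' ' :: ·)) := by
  show (List.range cs.length).foldl _ [] = _
  rw [PySem.List.foldl_append_eq_flatMap]
  simp only [List.nil_append]
  apply pvFlatMapCongr
  intro i _
  have h1 : PySem.List.slice cs none (some (i : Int)) = cs.take i :=
    PySem.List.slice_to_natCast ..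
  have h2 : PySem.List.slice cs (some ((i : Int) + 1)) none = cs.drop (i + 1) := by
    have : ((i : Int) + 1) = ((i + 1 : Nat) : Int) := by push_cast; ring
    rw [this, PySem.List.slice_from_natCast]
  rw [h1, h2, ← List.eraseIdx_eq_take_drop_succ]

def candA (xs : List Char) : List (List Char) :=
  (List.range xs.length).flatMap fun i =>
    (List.range xs.length).flatMap fun j =>
      if i ≠ j then
        (List.range xs.length).flatMap fun k =>
          if i ≠ k ∧ j ≠ k then [[xs.getD i ' ', xs.getD j ' ', xs.getD k ' ']] else []
      else []

theorem candA_eq (xs : List Char) : candA xs = permuPerms xs 3 := by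
  unfold candA
  rw [permuPerms_succ]
  apply pvFlatMapCongr
  intro i hi
  have hi' : i < xs.length := List.mem_range.mp hi
  set ys := xs.eraseIdx i with hys
  set xi := xs.getD i ' ' with hxi
  rw [permuPerms_succ, List.map_flatMap]
  have middle : ∀ j ∈ List.range xs.length,
      (if i ≠ j then
        (List.range xs.length).flatMap fun k =>
          if i ≠ k ∧ j ≠ k then [[xi, xs.getD j ' ', xs.getD k ' ']] else []
      else [])
      = (if j = i then [] else
          (fun c (m : Nat) => (List.range ys.length).flatMap fun k' =>
            if k' = m then [] else [[xi, c, ys.getD k' ' ']])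
          (xs.getD j ' ') (if j < i then j else j - 1)) := by
    intro j _
    by_cases hji : j = i
    · simp [hji]
    · have hij : i ≠ j := fun h => hji h.symm
      simp only [if_pos hij, if_neg hji]
      have inner :
          ((List.range xs.length).flatMap fun k =>
            if i ≠ k ∧ j ≠ k then [[xi, xs.getD j ' ', xs.getD k ' ']] else [])
          = (List.range xs.length).flatMap (fun k =>
              if k = i then [] else
                (fun c (m : Nat) => if m = (if j < i then j else j - 1) then []
                  else [[xi, xs.getD j ' ', c]]) (xs.getD k ' ')
                  (if k < i then k else k - 1)) := by
        apply pvFlatMapCongr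
        intro k _
        by_cases hki : k = i
        · simp [hki]
        · have h1 : i ≠ k := fun h => hki h.symm
          by_cases hjk : j = k
          · subst hjk
            simp
          · have h2 : (if k < i then k else k - 1) ≠ (if j < i then j else j - 1) := by
              by_cases h3 : k < i <;> by_cases h4 : j < i <;> simp [h3, h4] <;> omega
            simp [h1, hjk, hki, h2]
      rw [inner,
        pvSkip ' ' xs i hi' (G := fun c (m : Nat) =>
          if m = (if j < i then j else j - 1) then [] else [[xi, xs.getD j ' ', c]])]
  rw [pvFlatMapCongr middle,
    pvSkip ' ' xs i hi' (G := fun c (m : Nat) =>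
      (List.range ys.length).flatMap fun k' => if k' = m then [] else [[xi, c, ys.getD k' ' ']])]
  apply pvFlatMapCongr
  intro j' hj'
  have hj'' : j' < ys.length := List.mem_range.mp hj'
  rw [permuPerms_succ]
  simp only [permuPerms, List.map_flatMap, List.map_map]
  rw [← hys]
  have reshape :
      ((List.range ys.length).flatMap fun k' =>
        if k' = j' then [] else [[xi, ys.getD j' ' ', ys.getD k' ' ']])
      = (List.range ys.length).flatMap (fun k' =>
          if k' = j' then [] else
            (fun c (_ : Nat) => [[xi, ys.getD j' ' ', c]]) (ys.getD k' ' ')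
            (if k' < j' then k' else k' - 1)) := by
    apply pvFlatMapCongr; intro k' _; rfl
  rw [reshape, pvSkip ' ' ys j' hj'' (G := fun c (_ : Nat) => [[xi, ys.getD j' ' ', c]])]
  apply pvFlatMapCongr
  intro k'' _
  simp

def pvIns (pers : List String) (s : String) : List String :=
  if s ∉ pers then pers ++ [s] else pers

theorem A_norm (word : String) :
    (let chars := word.toList
     (List.range chars.length).foldl (fun pers i =>
       (List.range chars.length).foldl (fun pers j =>
         if i ≠ j then
           (List.range chars.length).foldl (fun pers k =>
             if i ≠ k ∧ j ≠ k then
               let str_tmp := String.ofList [chars.getD i ' ', chars.getD j ' ', chars.getD k ' ']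
               if str_tmp ∉ pers then pers ++ [str_tmp] else pers
             else pers) pers
         else pers) pers) [])
    = ((candA word.toList).map String.ofList).foldl pvIns [] := by
  set xs := word.toList
  show (List.range xs.length).foldl _ [] = _
  have lk : ∀ (i j : Nat) (pers : List String),
      ((List.range xs.length).foldl (fun pers k =>
        if i ≠ k ∧ j ≠ k then
          pvIns pers (String.ofList [xs.getD i ' ', xs.getD j ' ', xs.getD k ' '])
        else pers) pers)
      = ((List.range xs.length).flatMap (fun k =>
          if i ≠ k ∧ j ≠ k then
            [String.ofList [xs.getD i ' ', xs.getD j ' ', xs.getD k ' ']] else [])).foldl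
          pvIns pers := by
    intro i j pers
    rw [← pvFoldlFoldl]
    apply PySem.List.foldl_congr_mem
    intro acc k _
    by_cases h : i ≠ k ∧ j ≠ k <;> simp [h]
  have lj : ∀ (i : Nat) (pers : List String),
      ((List.range xs.length).foldl (fun pers j =>
        if i ≠ j then
          (List.range xs.length).foldl (fun pers k =>
            if i ≠ k ∧ j ≠ k then
              pvIns pers (String.ofList [xs.getD i ' ', xs.getD j ' ', xs.getD k ' '])
            else pers) pers
        else pers) pers)
      = ((List.range xs.length).flatMap (fun j =>
          if i ≠ j then
            (List.range xs.length).flatMap (fun k =>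
              if i ≠ k ∧ j ≠ k then
                [String.ofList [xs.getD i ' ', xs.getD j ' ', xs.getD k ' ']] else [])
          else [])).foldl pvIns pers := by
    intro i pers
    rw [← pvFoldlFoldl]
    apply PySem.List.foldl_congr_mem
    intro acc j _
    by_cases h : i ≠ j
    · simp only [if_pos h, lk]
    · simp [h]
  have li :
      ((List.range xs.length).foldl (fun pers i =>
        (List.range xs.length).foldl (fun pers j =>
          if i ≠ j then
            (List.range xs.length).foldl (fun pers k =>
              if i ≠ k ∧ j ≠ k then
                pvIns pers (String.ofList [xs.getD i ' ', xs.getD j ' ', xs.getD k ' '])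
              else pers) pers
          else pers) pers) [])
      = ((List.range xs.length).flatMap (fun i =>
          (List.range xs.length).flatMap (fun j =>
            if i ≠ j then
              (List.range xs.length).flatMap (fun k =>
                if i ≠ k ∧ j ≠ k then
                  [String.ofList [xs.getD i ' ', xs.getD j ' ', xs.getD k ' ']] else [])
            else []))).foldl pvIns [] := by
    rw [← pvFoldlFoldl]
    apply PySem.List.foldl_congr_mem
    intro acc i _
    exact lj i acc
  rw [show (fun pers i =>
        (List.range xs.length).foldl (fun pers j =>
          if i ≠ j then
            (List.range xs.length).foldl (fun pers k =>
              if i ≠ k ∧ j ≠ k then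
                let str_tmp := String.ofList [xs.getD i ' ', xs.getD j ' ', xs.getD k ' ']
                if str_tmp ∉ pers then pers ++ [str_tmp] else pers
              else pers) pers
          else pers) pers)
      = (fun (pers : List String) (i : Nat) =>
        (List.range xs.length).foldl (fun pers j =>
          if i ≠ j then
            (List.range xs.length).foldl (fun pers k =>
              if i ≠ k ∧ j ≠ k then
                pvIns pers (String.ofList [xs.getD i ' ', xs.getD j ' ', xs.getD k ' '])
              else pers) pers
          else pers) pers) from rfl]
  rw [li]
  congr 1
  simp [candA, List.map_flatMap, apply_ite]

theorem B_loop (ts : List (List Char)) (pers : List String) :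
    ((ts.foldl (fun (acc : List String × PySem.Set String) t =>
        let s := String.ofList t
        if PySem.Set.contains acc.2 s then acc
        else (acc.1 ++ [s], PySem.Set.add acc.2 s)) (pers, pers)).1)
    = (ts.map String.ofList).foldl pvIns pers := by
  induction ts generalizing pers with
  | nil => rfl
  | cons t ts ih =>
    simp only [List.foldl_cons, List.map_cons]
    by_cases h : String.ofList t ∈ pers
    · have hc : PySem.Set.contains pers (String.ofList t) = true :=
        (PySem.Set.contains_iff ..).mpr h
      simp only [hc, if_true]
      have : pvIns pers (String.ofList t) = pers := by simp [pvIns, h]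
      rw [this] at *
      exact ih pers
    · have hc : PySem.Set.contains pers (String.ofList t) = false := by
        rw [← Bool.not_eq_true]
        exact fun hh => h ((PySem.Set.contains_iff ..).mp hh)
      simp only [hc, if_false, Bool.false_eq_true]
      rw [PySem.Set.add_of_not_mem h]
      simp only [pvIns, if_pos h]
      exact ih (pers ++ [String.ofList t])


-- ===== VERDICT (by name: the statement is the Claim_ definition above) =====
theorem permu_spec : Claim_equal_permu := by
  intro word _
  show permu word = permu_alt word
  unfold permu permu_alt
  rw [A_norm word, candA_eq]
  exact (B_loop (permuPerms word.toList 3) []).symm
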